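-- pv_equiv track=rewrite | github.com/klenwell/code-challenges | python/advent-of-code/2021/day-12.py | visited_small_cave_twice
-- ===== SOURCE A (Python) =====
-- def visited_small_cave_twice(path):
--     visited_caves = []
--
--     for visited_cave in path:
--         if not visited_cave.islower():
--             continue
--
--         if visited_cave in visited_caves:
--             return True
--         else:
--             visited_caves.append(visited_cave)
--
--     return False
-- ===== SOURCE B (Python) =====
-- def visited_small_cave_twice(path):
--     lowers = [cave for cave in path if cave.islower()]
--     return len(lowers) != len(set(lowers))
-- ===== Notes on version B (the rewrite author's own statement) =====
-- stated objective: simpler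
-- what changed: Replaces the element-by-element scan with membership test, append and early return by a single collect-then-compare pass: gather the lowercase caves and compare the list's length with its set's cardinality.
import Mathlib
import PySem

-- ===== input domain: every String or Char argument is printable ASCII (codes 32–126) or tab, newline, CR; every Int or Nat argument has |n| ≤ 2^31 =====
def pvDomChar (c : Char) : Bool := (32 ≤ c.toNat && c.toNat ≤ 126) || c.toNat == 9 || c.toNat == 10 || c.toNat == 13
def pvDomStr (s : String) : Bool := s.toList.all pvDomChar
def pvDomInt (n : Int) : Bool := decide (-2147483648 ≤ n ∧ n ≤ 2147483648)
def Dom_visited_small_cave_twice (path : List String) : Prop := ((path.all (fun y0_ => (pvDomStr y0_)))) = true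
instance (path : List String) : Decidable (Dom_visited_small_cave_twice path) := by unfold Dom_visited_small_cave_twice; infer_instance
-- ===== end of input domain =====

-- B replaces A's scan-with-membership-and-early-return by a single collect-then-compare pass
-- (gather lowercase caves, compare list length with set cardinality); objective: simpler.


-- ===== PORT A =====
-- str.islower(): at least one cased character and no uppercase character.
-- Exact on the printable-ASCII domain, where the cased characters are exactly a-z and A-Z.
def pyStrIslower (s : String) : Bool :=
  s.toList.any (fun c => PySem.Chars.islower c || PySem.Chars.isupper c) &&
  s.toList.all (fun c => !PySem.Chars.isupper c)

-- the for-loop with the visited_caves accumulator and early return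
def visitedGoA : List String → List String → Bool
  | [], _ => false
  | visited_cave :: rest, visited_caves =>
    if !pyStrIslower visited_cave then visitedGoA rest visited_caves
    else if visited_caves.contains visited_cave then true
    else visitedGoA rest (visited_caves ++ [visited_cave])

def visited_small_cave_twice (path : List String) : Bool :=
  visitedGoA path []

-- ===== PORT B =====
def visited_small_cave_twice_alt (path : List String) : Bool :=
  let lowers := path.filter pyStrIslower
  lowers.length != (PySem.Set.ofList lowers).length

-- ===== PRECONDITION & SPEC =====
def Spec_visited_small_cave_twice (path : List String) (out : Bool) : Prop := out = visited_small_cave_twice_alt path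
instance (path : List String) (out : Bool) : Decidable (Spec_visited_small_cave_twice path out) := by unfold Spec_visited_small_cave_twice; infer_instance

-- ===== CLAIM (what is proved, stated in full; the proofs are below) =====
def Claim_equal_visited_small_cave_twice : Prop := ∀ (path : List String), Dom_visited_small_cave_twice path → Spec_visited_small_cave_twice path (visited_small_cave_twice path)

-- ===== LEMMAS AND PROOFS =====

-- A's loop returns true exactly when the seen-so-far list plus the remaining lowercase caves has a repeat
theorem visitedGoA_eq (l : List String) : ∀ (acc : List String), acc.Nodup →
    visitedGoA l acc = !(acc ++ l.filter pyStrIslower).Nodup := by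
  induction l with
  | nil => intro acc h; simp [visitedGoA, h]
  | cons x rest ih =>
    intro acc h
    by_cases hp : pyStrIslower x
    · by_cases hm : acc.contains x
      · simp only [List.contains_eq_mem, decide_eq_true_eq] at hm
        simp only [visitedGoA, Bool.not_true, Bool.false_eq_true, if_false,
          List.contains_eq_mem, hm, decide_true, if_true, List.filter_cons, hp]
        have hdup : ¬ (acc ++ x :: List.filter pyStrIslower rest).Nodup := by
          intro hnd
          rcases List.nodup_append.mp hnd with ⟨-, -, hdis⟩
          exact hdis x hm x (by simp) rfl
        simp [hdup]
      · have hnd : (acc ++ [x]).Nodup := by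
          simp only [List.contains_eq_mem, decide_eq_true_eq] at hm
          rw [List.nodup_append]
          refine ⟨h, List.nodup_singleton x, ?_⟩
          intro a ha b hb
          rw [List.mem_singleton] at hb
          subst hb
          exact fun hab => hm (hab ▸ ha)
        simp only [visitedGoA, hp, hm]
        simp only [Bool.not_true, Bool.false_eq_true, if_false]
        rw [ih _ hnd]
        simp [hp]
    · simp only [visitedGoA, hp]
      rw [ih _ h]
      simp [hp]

-- set(xs) (first occurrences, PySem.Set.ofList) is a sublist of xs
theorem foldl_add_sublist {α : Type} [BEq α] (xs : List α) :
    ∀ (s : List α), (xs.foldl PySem.Set.add s).Sublist (s ++ xs) := by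
  induction xs with
  | nil => intro s; simp
  | cons x rest ih =>
    intro s
    simp only [List.foldl_cons]
    have h := ih (PySem.Set.add s x)
    refine (by exact h : (List.foldl PySem.Set.add (PySem.Set.add s x) rest).Sublist (PySem.Set.add s x ++ rest)).trans ?_
    unfold PySem.Set.add
    by_cases hc : PySem.Set.contains s x = true
    · simp only [hc, if_true]
      exact List.Sublist.append (by simp) (List.sublist_cons_self x rest)
    · simp only [hc]
      simp
-- hence: equal lengths forces xs itself to have no duplicates
theorem nodup_of_length_ofList_eq {α : Type} [BEq α] [LawfulBEq α] (xs : List α)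
    (h : (PySem.Set.ofList xs).length = xs.length) : xs.Nodup := by
  have hs : (PySem.Set.ofList xs).Sublist xs := by
    simpa [PySem.Set.ofList, PySem.Set.empty] using foldl_add_sublist xs []
  have := hs.eq_of_length h
  rw [← this]
  exact PySem.Set.nodup_ofList xs

theorem alt_eq (path : List String) :
    visited_small_cave_twice_alt path = !(path.filter pyStrIslower).Nodup := by
  unfold visited_small_cave_twice_alt
  simp only []
  generalize (path.filter pyStrIslower) = lowers
  by_cases h : lowers.Nodup
  · rw [PySem.Set.ofList_eq_self_of_nodup _ h]
    simp [h]
  · have : (PySem.Set.ofList lowers).length ≠ lowers.length :=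
      fun he => h (nodup_of_length_ofList_eq _ he)
    simp [h, bne_iff_ne]
    omega

-- ===== VERDICT (by name: the statement is the Claim_ definition above) =====
theorem visited_small_cave_twice_spec : Claim_equal_visited_small_cave_twice := by
  intro path _
  unfold Spec_visited_small_cave_twice visited_small_cave_twice
  rw [visitedGoA_eq path [] List.nodup_nil, alt_eq]
  simp
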